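-- pv_equiv track=rewrite | github.com/shinkeonkim/today-ps | BOJ/17000~17999/17100~17199/17177.py | solution
-- ===== SOURCE A (Python) =====
-- def solution(L):
--   for i in range(1, L[0]):
--     L2 = [*L, i]
--
--     b,a,c,d = L2
--
--     if b*(b*b-a*a-c*c-d*d) == 2*a*c*d:
--       return i
--   else:
--     return -1
-- ===== SOURCE B (Python) =====
-- def _isqrt(n):
--     # integer square root, no imports (A imports nothing)
--     if n < 2:
--         return n
--     x = _isqrt(n >> 2) << 1
--     return x + 1 if (x + 1) * (x + 1) <= n else x
--
-- def solution(L):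
--     b = L[0]
--     if b < 2:
--         return -1
--     _, a, c = L
--     # condition b*(b^2-a^2-c^2-d^2) == 2*a*c*d  <=>  (b*d + a*c)^2 == K  (b != 0)
--     K = a * a * c * c + b * b * (b * b - a * a - c * c)
--     if K < 0:
--         return -1
--     s = _isqrt(K)
--     if s * s != K:
--         return -1
--     for r in (-a * c - s, -a * c + s):  # smaller root first
--         if r % b == 0:
--             d = r // b
--             if 1 <= d < b:
--                 return d
--     return -1
-- ===== Notes on version B (the rewrite author's own statement) =====
-- stated objective: alternative
-- what changed: B solves the equation b*(b^2-a^2-c^2-d^2)=2acd as a quadratic in d: it tests only the two candidate roots (-ac±sqrt(K))/b obtained with a hand-written integer square root, instead of A's linear scan of every d in range(1, L[0]).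
import Mathlib
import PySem

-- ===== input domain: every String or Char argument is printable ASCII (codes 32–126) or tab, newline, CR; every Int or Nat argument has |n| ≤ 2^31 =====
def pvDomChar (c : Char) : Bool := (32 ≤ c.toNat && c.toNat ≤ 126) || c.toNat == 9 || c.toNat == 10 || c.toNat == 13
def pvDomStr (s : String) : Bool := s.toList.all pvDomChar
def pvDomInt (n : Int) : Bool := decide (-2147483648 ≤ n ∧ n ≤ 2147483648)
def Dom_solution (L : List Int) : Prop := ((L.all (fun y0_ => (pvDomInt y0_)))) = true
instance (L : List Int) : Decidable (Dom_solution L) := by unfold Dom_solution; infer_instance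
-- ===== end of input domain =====

-- B solves the quadratic in d exactly (integer square root + the two candidate roots) instead of scanning every d in range(1, L[0]).

-- ===== PORT A =====
-- the for-loop with early return: first i in range(1, L[0]) satisfying the equation, else -1
def solutionLoop (L : List Int) : List Int → Int
  | [] => -1
  | i :: rest =>
    match L ++ [i] with
    | [b, a, c, d] =>
      if b * (b * b - a * a - c * c - d * d) = 2 * a * c * d then i else solutionLoop L rest
    | _ => -1   -- unpacking 'b,a,c,d = L2' raises ValueError here; excluded by Pre_

def solution (L : List Int) : Int :=
  solutionLoop L (PySem.List.pyRange 1 (PySem.List.pyGetD L 0 0) 1)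

-- ===== PORT B =====
-- port of Source B's hand-written _isqrt (recursion on n >> 2); it is only called on K ≥ 0, hence over Nat
def isqrtB (n : Nat) : Nat :=
  if n < 2 then n
  else if (isqrtB (n / 4) * 2 + 1) * (isqrtB (n / 4) * 2 + 1) ≤ n then isqrtB (n / 4) * 2 + 1
  else isqrtB (n / 4) * 2
decreasing_by all_goals exact Nat.div_lt_self (by omega) (by omega)

def solution_alt (L : List Int) : Int :=
  match L with
  | [] => -1                     -- Source B raises IndexError here; excluded by Pre_
  | b :: rest =>
    if b < 2 then -1
    else
      match rest with
      | [a, c] =>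
        let K := a * a * c * c + b * b * (b * b - a * a - c * c)
        if K < 0 then -1
        else
          let s : Int := (isqrtB K.toNat : Int)
          if s * s ≠ K then -1
          else
            let r1 := -a * c - s
            let r2 := -a * c + s
            if PySem.Int.mod r1 b = 0 ∧ 1 ≤ PySem.Int.floordiv r1 b ∧ PySem.Int.floordiv r1 b < b then
              PySem.Int.floordiv r1 b
            else if PySem.Int.mod r2 b = 0 ∧ 1 ≤ PySem.Int.floordiv r2 b ∧ PySem.Int.floordiv r2 b < b then
              PySem.Int.floordiv r2 b
            else -1
      | _ => -1                  -- Source B raises ValueError (unpack) here; excluded by Pre_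

-- ===== PRECONDITION & SPEC =====
-- Pre_ excludes exactly the inputs where A raises: L = [] (IndexError on L[0]), and
-- L of length ≠ 3 with L[0] ≥ 2 (the loop body runs and 'b,a,c,d = L2' raises ValueError).
def Pre_solution (L : List Int) : Prop := L ≠ [] ∧ (L.headI < 2 ∨ L.length = 3)
instance (L : List Int) : Decidable (Pre_solution L) := by unfold Pre_solution; infer_instance

def pvWitness_solution : List Int := [2, 1, 1]

def Spec_solution (L : List Int) (out : Int) : Prop := out = solution_alt L
instance (L : List Int) (out : Int) : Decidable (Spec_solution L out) := by unfold Spec_solution; infer_instance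

-- ===== CLAIM (what is proved, stated in full; the proofs are below) =====
def Claim_equal_solution : Prop := ∀ (L : List Int), Dom_solution L → Pre_solution L → Spec_solution L (solution L)

-- ===== LEMMAS AND PROOFS =====

theorem isqrtB_correct (n : Nat) :
    isqrtB n * isqrtB n ≤ n ∧ n < (isqrtB n + 1) * (isqrtB n + 1) := by
  induction n using Nat.strong_induction_on with
  | _ n ih =>
    rw [isqrtB]
    by_cases h : n < 2
    · rw [if_pos h]; interval_cases n <;> simp
    · rw [if_neg h]
      obtain ⟨ih1, ih2⟩ := ih (n / 4) (Nat.div_lt_self (by omega) (by omega))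
      set m := isqrtB (n / 4) with hm
      have h4a : n < 4 * (n / 4) + 4 := by omega
      have h4b : 4 * (n / 4) ≤ n := by omega
      by_cases h2 : (m * 2 + 1) * (m * 2 + 1) ≤ n
      · rw [if_pos h2]
        refine ⟨h2, ?_⟩
        have e : (m * 2 + 1 + 1) * (m * 2 + 1 + 1) = 4 * ((m + 1) * (m + 1)) := by ring
        rw [e]; omega
      · rw [if_neg h2]
        refine ⟨?_, by omega⟩
        have e : (m * 2) * (m * 2) = 4 * (m * m) := by ring
        rw [e]; omega

theorem isqrtB_unique (n m : Nat) (h : m * m = n) : isqrtB n = m := by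
  obtain ⟨hc1, hc2⟩ := isqrtB_correct n
  set s := isqrtB n with hs
  rcases lt_trichotomy s m with hl | he | hg
  · exfalso
    have h1 : s + 1 ≤ m := hl
    have h2 := Nat.mul_le_mul h1 h1
    have e1 : (s + 1) * (s + 1) = s * s + 2 * s + 1 := by ring
    nlinarith
  · exact he
  · exfalso
    have h1 : m + 1 ≤ s := hg
    have h2 := Nat.mul_le_mul h1 h1
    have e1 : (m + 1) * (m + 1) = m * m + 2 * m + 1 := by ring
    nlinarith

-- the equation is equivalent to '(b*i + a*c)^2 = K' when b ≠ 0
theorem eq_iff_sq (b a c i : Int) (hb : b ≠ 0) :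
    (b * (b * b - a * a - c * c - i * i) = 2 * a * c * i) ↔
      (b * i + a * c) * (b * i + a * c) = a * a * c * c + b * b * (b * b - a * a - c * c) := by
  constructor
  · intro h; linear_combination (-b) * h
  · intro h
    have h2 : b * (b * (b * b - a * a - c * c - i * i) - 2 * a * c * i) = 0 := by
      linear_combination -h
    rcases mul_eq_zero.mp h2 with h3 | h3
    · exact absurd h3 hb
    · linarith

theorem loop_none (b a c : Int) (l : List Int)
    (h : ∀ i ∈ l, ¬ (b * (b * b - a * a - c * c - i * i) = 2 * a * c * i)) :
    solutionLoop [b, a, c] l = -1 := by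
  induction l with
  | nil => rfl
  | cons i rest ih =>
    simp only [solutionLoop, List.cons_append, List.nil_append]
    rw [if_neg (h i (by simp))]
    exact ih (fun y hy => h y (by simp [hy]))

theorem loop_first (b a c x : Int) (l1 l2 : List Int)
    (h1 : ∀ y ∈ l1, ¬ (b * (b * b - a * a - c * c - y * y) = 2 * a * c * y))
    (hx : b * (b * b - a * a - c * c - x * x) = 2 * a * c * x) :
    solutionLoop [b, a, c] (l1 ++ x :: l2) = x := by
  induction l1 with
  | nil => simp only [List.nil_append, solutionLoop, List.cons_append]; rw [if_pos hx]
  | cons y rest ih =>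
    simp only [List.cons_append, solutionLoop, List.nil_append]
    rw [if_neg (h1 y (by simp))]
    exact ih (fun z hz => h1 z (by simp [hz]))

-- divisibility bridge: for 0 < b, 'r % b == 0' and 'r // b' behave as exact division
theorem mod_zero_iff (r b : Int) (hb : 0 < b) :
    PySem.Int.mod r b = 0 ↔ b ∣ r := by
  rw [PySem.Int.mod_eq_emod_of_pos hb]
  omega

theorem floordiv_mul (r b : Int) (hb : 0 < b) (hd : b ∣ r) :
    b * PySem.Int.floordiv r b = r := by
  rw [PySem.Int.floordiv_eq_ediv_of_pos hb]
  exact Int.mul_ediv_cancel' hd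

theorem floordiv_mul_self (i b : Int) (hb : 0 < b) :
    PySem.Int.floordiv (b * i) b = i := by
  rw [PySem.Int.floordiv_eq_ediv_of_pos hb]
  exact Int.mul_ediv_cancel_left _ (by omega)

-- main case: L = [b, a, c] with 2 ≤ b
theorem main_case (b a c : Int) (hb : 2 ≤ b) :
    solutionLoop [b, a, c] (PySem.List.pyRange 1 b 1) = solution_alt [b, a, c] := by
  have hb0 : (0:Int) < b := by omega
  have hbne : b ≠ 0 := by omega
  set K : Int := a * a * c * c + b * b * (b * b - a * a - c * c) with hK
  have hiff : ∀ i : Int, (b * (b * b - a * a - c * c - i * i) = 2 * a * c * i) ↔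
      (b * i + a * c) * (b * i + a * c) = K := fun i => eq_iff_sq b a c i hbne
  simp only [solution_alt]
  rw [if_neg (by omega : ¬ b < 2)]
  by_cases hKneg : K < 0
  · rw [if_pos hKneg]
    exact loop_none b a c _ (fun i _ h => by nlinarith [(hiff i).mp h, sq_nonneg (b * i + a * c)])
  · rw [if_neg hKneg]
    set s : Int := (isqrtB K.toNat : Int) with hs
    have hKnn : (0:Int) ≤ K := by omega
    by_cases hsq : s * s ≠ K
    · rw [if_pos hsq]
      refine loop_none b a c _ (fun i _ h => ?_)
      have h2 : (b * i + a * c) * (b * i + a * c) = K := (hiff i).mp h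
      have h3i : ((b * i + a * c).natAbs : Int) * ((b * i + a * c).natAbs : Int) = K := by
        rw [Int.natAbs_mul_self']
        exact h2
      have h3 : (b * i + a * c).natAbs * (b * i + a * c).natAbs = K.toNat := by
        exact_mod_cast h3i.trans (Int.toNat_of_nonneg hKnn).symm
      apply hsq
      rw [hs, isqrtB_unique _ _ h3]
      exact h3i
    · rw [if_neg hsq]
      rw [not_not] at hsq
      have hs0 : 0 ≤ s := by rw [hs]; exact Int.natCast_nonneg _
      -- solutions of the equation are exactly the two roots
      have hsol : ∀ i : Int, (b * (b * b - a * a - c * c - i * i) = 2 * a * c * i) ↔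
          (b * i = -a * c - s ∨ b * i = -a * c + s) := by
        intro i
        rw [hiff i, ← hsq]
        constructor
        · intro h
          have h2 : (b * i + a * c - s) * (b * i + a * c + s) = 0 := by linear_combination h
          rcases mul_eq_zero.mp h2 with h3 | h3
          · right; linarith
          · left; linarith
        · rintro (h | h) <;> (rw [show b * i = _ from h]; ring)
      set r1 : Int := -a * c - s with hr1
      set r2 : Int := -a * c + s with hr2
      have hr12 : r1 ≤ r2 := by simp only [hr1, hr2]; omega
      by_cases hc1 : PySem.Int.mod r1 b = 0 ∧ 1 ≤ PySem.Int.floordiv r1 b ∧ PySem.Int.floordiv r1 b < b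
      · rw [if_pos hc1]
        set d1 := PySem.Int.floordiv r1 b with hd1
        have hbd1 : b * d1 = r1 := floordiv_mul r1 b hb0 ((mod_zero_iff r1 b hb0).mp hc1.1)
        rw [PySem.List.pyRange_one_append 1 d1 b hc1.2.1 (by omega),
            PySem.List.pyRange_one_cons (by omega : d1 < b)]
        refine loop_first b a c d1 _ _ (fun y hy h => ?_) ((hsol d1).mpr (Or.inl hbd1))
        have hylt : y < d1 := ((PySem.List.mem_pyRange_one).mp hy).2
        have hmul : b * y < b * d1 := by
          exact mul_lt_mul_of_pos_left hylt hb0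
        rcases (hsol y).mp h with h2 | h2 <;> omega
      · rw [if_neg hc1]
        by_cases hc2 : PySem.Int.mod r2 b = 0 ∧ 1 ≤ PySem.Int.floordiv r2 b ∧ PySem.Int.floordiv r2 b < b
        · rw [if_pos hc2]
          set d2 := PySem.Int.floordiv r2 b with hd2
          have hbd2 : b * d2 = r2 := floordiv_mul r2 b hb0 ((mod_zero_iff r2 b hb0).mp hc2.1)
          rw [PySem.List.pyRange_one_append 1 d2 b hc2.2.1 (by omega),
              PySem.List.pyRange_one_cons (by omega : d2 < b)]
          refine loop_first b a c d2 _ _ (fun y hy h => ?_) ((hsol d2).mpr (Or.inr hbd2))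
          obtain ⟨hy1, hy2⟩ := (PySem.List.mem_pyRange_one).mp hy
          rcases (hsol y).mp h with h2 | h2
          · -- then r1 is divisible with quotient y ∈ [1, b): contradicts hc1
            exact hc1 ⟨(mod_zero_iff r1 b hb0).mpr ⟨y, by linarith [h2]⟩,
              by rw [← h2, floordiv_mul_self y b hb0]; omega,
              by rw [← h2, floordiv_mul_self y b hb0]; omega⟩
          · have hmul : b * y < b * d2 := mul_lt_mul_of_pos_left hy2 hb0
            omega
        · rw [if_neg hc2]
          refine loop_none b a c _ (fun i hi h => ?_)
          obtain ⟨hi1, hi2⟩ := (PySem.List.mem_pyRange_one).mp hi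
          rcases (hsol i).mp h with h2 | h2
          · exact hc1 ⟨(mod_zero_iff r1 b hb0).mpr ⟨i, by linarith [h2]⟩,
              by rw [← h2, floordiv_mul_self i b hb0]; omega,
              by rw [← h2, floordiv_mul_self i b hb0]; omega⟩
          · exact hc2 ⟨(mod_zero_iff r2 b hb0).mpr ⟨i, by linarith [h2]⟩,
              by rw [← h2, floordiv_mul_self i b hb0]; omega,
              by rw [← h2, floordiv_mul_self i b hb0]; omega⟩

-- ===== VERDICT (by name: the statement is the Claim_ definition above) =====
theorem solution_spec : Claim_equal_solution := by
  intro L _ hpre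
  obtain ⟨hne, hcase⟩ := hpre
  unfold Spec_solution
  match L with
  | [] => exact absurd rfl hne
  | b :: rest =>
    have hcase' : b < 2 ∨ rest.length = 2 := by simpa using hcase
    have h0 : PySem.List.pyGetD (b :: rest) 0 0 = b := by
      simp [PySem.List.pyGetD, PySem.List.pyGet?, PySem.List.pyIdx?]
    by_cases hb : b < 2
    · -- range(1, b) is empty; both sides return -1
      simp only [solution, h0, PySem.List.pyRange_one_eq_nil (by omega : b ≤ (1:Int))]
      simp [solutionLoop, solution_alt, hb]
    · have hlen : rest.length = 2 := by omega
      match rest, hlen with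
      | [a, c], _ =>
        simp only [solution, h0]
        exact main_case b a c (by omega)
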